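-- pv_equiv track=rewrite | github.com/MathEletric/Wizards_Repository_Python | Introduction_to_Computer_Science_with_Python/PARTE_1/PARTE_1_6/EX_04.py | soma_hipotenusa_v2
-- ===== SOURCE A (Python) =====
-- def soma_hipotenusa_v2(n):
--
--     sum = 0
--
--     while n:
--
--         i = 0
--         found = False
--
--         while i < n and not found:
--             i +=1
--             j = 1
--             while j < n:
--
--                 if i**2 + j**2 == n**2:
--                     sum += n
--                     found = True
--                     break
--
--                 j += 1
--         n -= 1
--     return sum
-- ===== SOURCE B (Python) =====
-- def soma_hipotenusa_v2(n):
--     squares = set()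
--     for k in range(1, n + 1):
--         squares.add(k * k)
--     total = 0
--     for m in range(1, n + 1):
--         mm = m * m
--         for i in range(1, m):
--             if mm - i * i in squares:
--                 total += m
--                 break
--     return total
-- ===== Notes on version B (the rewrite author's own statement) =====
-- stated objective: faster
-- what changed: B precomputes the set of squares {k*k : 1<=k<=n} once and, for each candidate hypotenuse m, scans legs i with an O(1) hash-set membership test for m*m - i*i, replacing A's triply nested leg/leg scan per hypotenuse.
import Mathlib
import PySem

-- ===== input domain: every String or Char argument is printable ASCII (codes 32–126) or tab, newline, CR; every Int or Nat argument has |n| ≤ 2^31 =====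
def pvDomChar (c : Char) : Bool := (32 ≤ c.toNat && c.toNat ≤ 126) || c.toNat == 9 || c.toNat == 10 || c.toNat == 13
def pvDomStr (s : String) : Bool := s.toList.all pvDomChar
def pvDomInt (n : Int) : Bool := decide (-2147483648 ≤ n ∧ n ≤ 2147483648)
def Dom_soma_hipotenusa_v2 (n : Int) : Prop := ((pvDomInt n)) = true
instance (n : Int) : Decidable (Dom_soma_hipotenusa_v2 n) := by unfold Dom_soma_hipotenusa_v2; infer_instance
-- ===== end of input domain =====

-- B replaces A's per-hypotenuse double leg scan by one precomputed square set and a membership test (measured asymptotically faster).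
-- A's while-loops are ported as structural recursion on an explicit fuel that equals the number of remaining iterations.

-- ===== PORT A =====
-- innermost loop: `while j < n: if i**2 + j**2 == n**2: … break; j += 1` — returns whether some j was found;
-- fuel = (m - j).toNat, exactly the remaining iteration count, so the port runs the loop step for step
def pvJloop : Nat → Int → Int → Int → Bool
  | 0, _, _, _ => false
  | fuel + 1, i, m, j =>
    if j < m then
      if i ^ 2 + j ^ 2 == m ^ 2 then true
      else pvJloop fuel i m (j + 1)
    else false

-- middle loop: `while i < n and not found: i += 1; <j-loop>` — returns `found`; fuel = (m - i).toNat
def pvIloop : Nat → Int → Int → Bool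
  | 0, _, _ => false
  | fuel + 1, i, m =>
    if i < m then
      if pvJloop (m - 1).toNat (i + 1) m 1 then true
      else pvIloop fuel (i + 1) m
    else false

-- outer loop: `while n: … ; n -= 1` (on the Pre_ domain n ≥ 0 the test `n` is exactly `0 < n`); fuel = m.toNat
def pvAloop : Nat → Int → Int → Int
  | 0, _, acc => acc
  | fuel + 1, m, acc =>
    if 0 < m then
      pvAloop fuel (m - 1) (acc + if pvIloop m.toNat 0 m then m else 0)
    else acc

def soma_hipotenusa_v2 (n : Int) : Int := pvAloop n.toNat n 0

-- ===== PORT B =====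
-- `squares = set(); for k in range(1, n+1): squares.add(k*k)`
def pvSquares (n : Int) : PySem.Set Int :=
  (PySem.List.pyRange 1 (n + 1) 1).foldl (fun s k => PySem.Set.add s (k * k)) PySem.Set.empty

-- inner `for i in range(1, m): if mm - i*i in squares: …; break` — whether some i hits
def pvBfound (squares : PySem.Set Int) (mm m : Int) : Bool :=
  (PySem.List.pyRange 1 m 1).any (fun i => PySem.Set.contains squares (mm - i * i))

def soma_hipotenusa_v2_alt (n : Int) : Int :=
  let squares := pvSquares n
  (PySem.List.pyRange 1 (n + 1) 1).foldl
    (fun total m => if pvBfound squares (m * m) m then total + m else total) 0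

-- ===== PRECONDITION & SPEC =====
-- Pre_ excludes n < 0, where Python A's `while n:` loop never terminates (A returns no value there).
def Pre_soma_hipotenusa_v2 (n : Int) : Prop := 0 ≤ n
instance (n : Int) : Decidable (Pre_soma_hipotenusa_v2 n) := by unfold Pre_soma_hipotenusa_v2; infer_instance
def pvWitness_soma_hipotenusa_v2 : Int := 13

def Spec_soma_hipotenusa_v2 (n : Int) (out : Int) : Prop := out = soma_hipotenusa_v2_alt n
instance (n : Int) (out : Int) : Decidable (Spec_soma_hipotenusa_v2 n out) := by unfold Spec_soma_hipotenusa_v2; infer_instance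

-- ===== CLAIM (what is proved, stated in full; the proofs are below) =====
def Claim_equal_soma_hipotenusa_v2 : Prop := ∀ (n : Int), Dom_soma_hipotenusa_v2 n → Pre_soma_hipotenusa_v2 n → Spec_soma_hipotenusa_v2 n (soma_hipotenusa_v2 n)

-- ===== LEMMAS AND PROOFS =====

theorem pvJloop_iff (i m j : Int) (fuel : Nat) (hk : fuel = (m - j).toNat) :
    pvJloop fuel i m j = true ↔ ∃ t : Int, j ≤ t ∧ t < m ∧ i ^ 2 + t ^ 2 = m ^ 2 := by
  induction fuel generalizing j with
  | zero =>
    simp only [pvJloop, Bool.false_eq_true, false_iff]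
    rintro ⟨t, h1, h2, _⟩; omega
  | succ k ih =>
    have hj : j < m := by omega
    simp only [pvJloop, if_pos hj]
    by_cases he : i ^ 2 + j ^ 2 = m ^ 2
    · have hb : (i ^ 2 + j ^ 2 == m ^ 2) = true := by simpa using he
      rw [hb, if_pos rfl]
      exact iff_of_true rfl ⟨j, le_refl _, hj, he⟩
    · have hb : (i ^ 2 + j ^ 2 == m ^ 2) = false := by simpa using he
      rw [hb, if_neg Bool.false_ne_true]
      rw [ih (j + 1) (by omega)]
      constructor
      · rintro ⟨t, h1, h2, h3⟩; exact ⟨t, by omega, h2, h3⟩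
      · rintro ⟨t, h1, h2, h3⟩
        refine ⟨t, ?_, h2, h3⟩
        rcases eq_or_lt_of_le h1 with h | h
        · exact absurd (h ▸ h3) he
        · omega

theorem pvIloop_iff (i m : Int) (fuel : Nat) (hk : fuel = (m - i).toNat) :
    pvIloop fuel i m = true ↔ ∃ s t : Int, i < s ∧ s ≤ m ∧ 1 ≤ t ∧ t < m ∧ s ^ 2 + t ^ 2 = m ^ 2 := by
  induction fuel generalizing i with
  | zero =>
    simp only [pvIloop, Bool.false_eq_true, false_iff]
    rintro ⟨s, t, h1, h2, _⟩; omega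
  | succ k ih =>
    have hi : i < m := by omega
    simp only [pvIloop, if_pos hi]
    by_cases hf : pvJloop (m - 1).toNat (i + 1) m 1 = true
    · rw [hf, if_pos rfl]
      obtain ⟨t, ht1, htm, hte⟩ := (pvJloop_iff (i + 1) m 1 (m - 1).toNat (by omega)).mp hf
      exact iff_of_true rfl ⟨i + 1, t, by omega, by omega, ht1, htm, hte⟩
    · rw [Bool.not_eq_true] at hf
      rw [hf, if_neg Bool.false_ne_true]
      rw [ih (i + 1) (by omega)]
      constructor
      · rintro ⟨s, t, h1, h2, h3, h4, h5⟩; exact ⟨s, t, by omega, h2, h3, h4, h5⟩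
      · rintro ⟨s, t, h1, h2, h3, h4, h5⟩
        refine ⟨s, t, ?_, h2, h3, h4, h5⟩
        rcases eq_or_lt_of_le (by omega : i + 1 ≤ s) with h | h
        · exfalso
          have hcontra : pvJloop (m - 1).toNat (i + 1) m 1 = true :=
            (pvJloop_iff (i + 1) m 1 (m - 1).toNat (by omega)).mpr ⟨t, h3, h4, h ▸ h5⟩
          rw [hf] at hcontra
          exact Bool.false_ne_true hcontra
        · omega

theorem pvBfound_iff (n mm m : Int) :
    pvBfound (pvSquares n) mm m = true ↔
      ∃ i : Int, 1 ≤ i ∧ i < m ∧ ∃ k : Int, 1 ≤ k ∧ k < n + 1 ∧ mm - i * i = k * k := by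
  unfold pvBfound pvSquares
  rw [List.any_eq_true]
  constructor
  · rintro ⟨i, hi, hc⟩
    rw [PySem.List.mem_pyRange_one] at hi
    rw [PySem.Set.contains_iff, PySem.Set.mem_foldl_add] at hc
    rcases hc with h | ⟨k, hk, he⟩
    · simp [PySem.Set.empty] at h
    · rw [PySem.List.mem_pyRange_one] at hk
      exact ⟨i, hi.1, hi.2, k, hk.1, hk.2, he⟩
  · rintro ⟨i, hi1, him, k, hk1, hkn, he⟩
    refine ⟨i, ?_, ?_⟩
    · rw [PySem.List.mem_pyRange_one]; exact ⟨hi1, him⟩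
    · rw [PySem.Set.contains_iff, PySem.Set.mem_foldl_add]
      exact Or.inr ⟨k, by rw [PySem.List.mem_pyRange_one]; exact ⟨hk1, hkn⟩, he⟩

theorem found_agree (n m : Int) (h1 : 1 ≤ m) (h2 : m ≤ n) :
    pvIloop m.toNat 0 m = pvBfound (pvSquares n) (m * m) m := by
  rw [Bool.eq_iff_iff, pvIloop_iff 0 m m.toNat (by omega), pvBfound_iff]
  constructor
  · rintro ⟨s, t, hs0, hsm, ht1, htm, he⟩
    have hsm' : s < m := by nlinarith
    refine ⟨s, by omega, hsm', t, ht1, by omega, by nlinarith⟩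
  · rintro ⟨i, hi1, him, k, hk1, hkn, he⟩
    have hkm : k < m := by nlinarith
    exact ⟨i, k, by omega, by omega, hk1, hkm, by nlinarith⟩

theorem pvAloop_eq_sum (N : Nat) (acc : Int) :
    pvAloop N (N : Int) acc =
      acc + ((PySem.List.pyRange 1 ((N : Int) + 1) 1).map
        (fun m => if pvIloop m.toNat 0 m then m else 0)).sum := by
  induction N generalizing acc with
  | zero =>
    simp [pvAloop, PySem.List.pyRange_one_eq_nil]
  | succ N ih =>
    have h0 : (0 : Int) < ((N : Int) + 1) := by omega
    show (if 0 < ((N : Nat) + 1 : Int) then _ else _) = _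
    push_cast
    rw [if_pos h0]
    have harg : (N : Int) + 1 - 1 = (N : Int) := by ring
    rw [harg, ih]
    rw [PySem.List.pyRange_one_succ_right (by omega : (1 : Int) ≤ (N : Int) + 1)]
    rw [List.map_append, List.sum_append]
    simp only [List.map_cons, List.map_nil, List.sum_cons, List.sum_nil]
    ring

-- ===== VERDICT (by name: the statement is the Claim_ definition above) =====
theorem soma_hipotenusa_v2_spec : Claim_equal_soma_hipotenusa_v2 := by
  intro n _hdom hpre
  unfold Spec_soma_hipotenusa_v2 soma_hipotenusa_v2
  show pvAloop n.toNat n 0 =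
    (PySem.List.pyRange 1 (n + 1) 1).foldl
      (fun total m => if pvBfound (pvSquares n) (m * m) m then total + m else total) 0
  have hn : (0 : Int) ≤ n := hpre
  obtain ⟨N, rfl⟩ : ∃ N : Nat, n = (N : Int) := ⟨n.toNat, by omega⟩
  have hfun : (fun (total m : Int) => if pvBfound (pvSquares (N : Int)) (m * m) m then total + m else total)
      = fun total m => total + (if pvBfound (pvSquares (N : Int)) (m * m) m then m else 0) := by
    funext t m; split <;> simp
  rw [Int.toNat_natCast, pvAloop_eq_sum, hfun, PySem.List.foldl_add]
  congr 1
  apply congrArg List.sum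
  apply List.map_congr_left
  intro m hm
  rw [PySem.List.mem_pyRange_one] at hm
  rw [found_agree (N : Int) m hm.1 (by omega)]
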